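-- pv_equiv track=rewrite | github.com/daDiz/SD-STGCN | baselines/finding_zero/pygcn/data_loader_delay.py | sample_at
-- ===== SOURCE A (Python) =====
-- def sample_at(iterations, ind):
--     n = len(iterations)
--     if ind > n:
--         raise Exception('step must be < len(iterations)')
--
--     m = min(ind+1,n)
--
--     g = iterations[0]['status'].copy()
--     N = len(g)
--     for step in range(1,m):
--         s = iterations[step]['status']
--         if len(s) > 0:
--             for k in s:
--                 g[k] = s[k]
--
--     snapshot = [g[k] for k in range(N)]
--
--     return snapshot
-- ===== SOURCE B (Python) =====
-- def sample_at(iterations, ind):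
--     n = len(iterations)
--     if ind > n:
--         raise Exception('step must be < len(iterations)')
--
--     last = max(min(ind + 1, n), 1) - 1
--     N = len(iterations[0]['status'])
--
--     snapshot = []
--     for k in range(N):
--         for step in range(last, -1, -1):
--             s = iterations[step]['status']
--             if k in s:
--                 snapshot.append(s[k])
--                 break
--         else:
--             raise KeyError(k)
--     return snapshot
-- ===== Notes on version B (the rewrite author's own statement) =====
-- stated objective: alternative
-- what changed: A accumulates a forward last-write-wins dict over all applied steps and then reads indices 0..N-1 out of it; B keeps no accumulator and instead, for each index k, scans the applied steps backwards and returns the first status update containing k (breaking early).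
import Mathlib
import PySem

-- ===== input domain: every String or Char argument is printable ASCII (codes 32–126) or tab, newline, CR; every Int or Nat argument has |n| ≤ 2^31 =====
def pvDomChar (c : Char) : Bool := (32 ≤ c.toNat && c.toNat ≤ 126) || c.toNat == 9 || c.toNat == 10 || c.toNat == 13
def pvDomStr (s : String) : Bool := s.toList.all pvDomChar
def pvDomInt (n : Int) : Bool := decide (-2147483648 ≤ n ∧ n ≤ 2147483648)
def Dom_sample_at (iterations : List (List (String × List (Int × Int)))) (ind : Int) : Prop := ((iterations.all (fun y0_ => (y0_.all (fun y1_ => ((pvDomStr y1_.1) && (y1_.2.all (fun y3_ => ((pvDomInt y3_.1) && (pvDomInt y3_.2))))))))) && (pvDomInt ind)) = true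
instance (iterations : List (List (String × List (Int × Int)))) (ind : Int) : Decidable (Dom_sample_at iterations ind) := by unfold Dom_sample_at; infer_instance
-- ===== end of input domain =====

-- B replaces A's forward last-write-wins dict accumulation by a key-major backward search
-- (for each index scan steps from the latest applied one down, first status containing it wins);
-- objective: alternative decomposition, same values.


-- shared input decoding: `iterations[j]['status']` as a dict int -> int
def pvStatus (iterations : List (List (String × List (Int × Int)))) (j : Nat) : PySem.Dict Int Int :=
  PySem.Dict.ofList ((PySem.Dict.ofList (iterations.getD j [])).getD "status" [])

-- ===== PORT A =====
def sample_at (iterations : List (List (String × List (Int × Int)))) (ind : Int) : List Int :=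
  let n : Int := iterations.length
  if ind > n then []  -- Python raises here; excluded by Pre_
  else
    let m := min (ind + 1) n
    let g0 := pvStatus iterations 0          -- g = iterations[0]['status'].copy()
    let N := g0.size
    let g := (PySem.List.pyRange 1 m 1).foldl (fun g step =>
        let s := pvStatus iterations step.toNat
        if s.size > 0 then
          s.items.foldl (fun g kv => g.insert kv.1 kv.2) g   -- for k in s: g[k] = s[k]
        else g) g0
    (List.range N).map (fun k => g.getD (k : Int) 0)         -- [g[k] for k in range(N)]; KeyError excluded by Pre_

-- ===== PORT B =====
def sample_at_alt (iterations : List (List (String × List (Int × Int)))) (ind : Int) : List Int :=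
  let n : Int := iterations.length
  if ind > n then []  -- Python raises here; excluded by Pre_
  else
    let last := max (min (ind + 1) n) 1 - 1
    let N := (pvStatus iterations 0).size
    (List.range N).map (fun k =>
      ((PySem.List.pyRange last (-1) (-1)).findSome? (fun step =>
          (pvStatus iterations step.toNat).get? (k : Int))).getD 0)   -- for..break / else raise; raise excluded by Pre_

-- ===== PRECONDITION & SPEC =====
-- number of steps A reads: steps 0 .. max(min(ind+1,n),1)-1
def pvM (iterations : List (List (String × List (Int × Int)))) (ind : Int) : Nat :=
  (max (min (ind + 1) (iterations.length : Int)) 1).toNat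

-- Pre_ excludes exactly the inputs on which the Python A raises: ind > len(iterations) (explicit raise),
-- empty iterations (IndexError), a read step without the 'status' key (KeyError), and an index
-- k < N missing from every read status (KeyError in the final comprehension).
def Pre_sample_at (iterations : List (List (String × List (Int × Int)))) (ind : Int) : Prop :=
  iterations ≠ [] ∧ ind ≤ (iterations.length : Int) ∧
  (∀ j : Nat, j < pvM iterations ind →
      (PySem.Dict.ofList (iterations.getD j [])).contains "status" = true) ∧
  (∀ k : Nat, k < (pvStatus iterations 0).size →
      ∃ j : Nat, j < pvM iterations ind ∧ (pvStatus iterations j).contains (k : Int) = true)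
instance (iterations : List (List (String × List (Int × Int)))) (ind : Int) : Decidable (Pre_sample_at iterations ind) := by unfold Pre_sample_at; infer_instance

def pvWitness_sample_at : (List (List (String × List (Int × Int)))) × Int :=
  ([[("status", [(0, 7), (1, 8)])], [("status", [(0, 9)])]], 1)

def Spec_sample_at (iterations : List (List (String × List (Int × Int)))) (ind : Int) (out : List Int) : Prop := out = sample_at_alt iterations ind
instance (iterations : List (List (String × List (Int × Int)))) (ind : Int) (out : List Int) : Decidable (Spec_sample_at iterations ind out) := by unfold Spec_sample_at; infer_instance

-- ===== CLAIM (what is proved, stated in full; the proofs are below) =====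
def Claim_equal_sample_at : Prop := ∀ (iterations : List (List (String × List (Int × Int)))) (ind : Int), Dom_sample_at iterations ind → Pre_sample_at iterations ind → Spec_sample_at iterations ind (sample_at iterations ind)

-- ===== LEMMAS AND PROOFS =====

-- last-match view of a run of inserts
theorem foldl_insert_get? (l : List (Int × Int)) (g : PySem.Dict Int Int) (x : Int) :
    (l.foldl (fun g kv => g.insert kv.1 kv.2) g).get? x
      = (l.reverse.findSome? (fun kv => if kv.1 = x then some kv.2 else none)).or (g.get? x) := by
  induction l generalizing g with
  | nil => simp
  | cons kv t ih =>
    simp only [List.foldl_cons, List.reverse_cons, List.findSome?_append, ih]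
    rcases h : t.reverse.findSome? (fun kv => if kv.1 = x then some kv.2 else none) with _ | v
    · by_cases hx : kv.1 = x
      · subst hx; simp [PySem.Dict.get?_insert_self, Option.or, List.findSome?, h]
      · simp [PySem.Dict.get?_insert_of_ne _ _ (Ne.symm hx), hx, Option.or, List.findSome?, h]
    · simp [Option.or, h]

-- on a dict with unique keys, the last match over the items equals get?
theorem revFind_items_eq_get? (s : PySem.Dict Int Int) (hnd : s.keys.Nodup) (x : Int) :
    s.items.reverse.findSome? (fun kv => if kv.1 = x then some kv.2 else none) = s.get? x := by
  obtain ⟨l⟩ := s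
  simp only [PySem.Dict.keys] at hnd
  induction l with
  | nil => simp [PySem.Dict.get?]
  | cons kv t ih =>
    simp only [List.map_cons, List.nodup_cons] at hnd
    have hrec := ih hnd.2
    simp only [List.reverse_cons, List.findSome?_append] at hrec ⊢
    rw [hrec]
    by_cases hx : kv.1 = x
    · subst hx
      have hnone : PySem.Dict.get? (PySem.Dict.mk t) kv.1 = none := by
        rw [PySem.Dict.get?_eq_none_iff_not_mem_keys]
        simpa [PySem.Dict.keys] using hnd.1
      rw [PySem.Dict.get?_mk_cons]
      simp [hnone, Option.or, List.findSome?]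
    · have hbx : (kv.1 == x) = false := by simp [hx]
      rw [PySem.Dict.get?_mk_cons, hbx]
      cases h2 : PySem.Dict.get? (PySem.Dict.mk t) x <;>
        simp [hx, Option.or, List.findSome?]

-- one update step of A, read through get?
theorem step_get? (s g0 : PySem.Dict Int Int) (x : Int) (hnd : s.keys.Nodup) :
    (if s.size > 0 then s.items.foldl (fun g kv => g.insert kv.1 kv.2) g0 else g0).get? x
      = (s.get? x).or (g0.get? x) := by
  by_cases hs : s.size > 0
  · rw [if_pos hs, foldl_insert_get?, revFind_items_eq_get? s hnd x]
  · rw [if_neg hs]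
    have hit : s.items = [] := by
      simp only [PySem.Dict.size] at hs
      exact List.eq_nil_of_length_eq_zero (by omega)
    have : s.get? x = none := by simp [PySem.Dict.get?, hit]
    simp [this, Option.or]

-- the whole update loop of A equals a backward first-match search over the steps
theorem foldl_steps_get? (L : List Int) (φ : Int → PySem.Dict Int Int)
    (g0 : PySem.Dict Int Int) (x : Int) (hnd : ∀ j : Int, (φ j).keys.Nodup) :
    (L.foldl (fun g step =>
        if (φ step).size > 0 then (φ step).items.foldl (fun g kv => g.insert kv.1 kv.2) g else g) g0).get? x
      = (L.reverse.findSome? (fun j => (φ j).get? x)).or (g0.get? x) := by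
  induction L generalizing g0 with
  | nil => simp
  | cons j t ih =>
    have hsing : List.findSome? (fun j => (φ j).get? x) [j] = (φ j).get? x := by
      cases h : (φ j).get? x <;> simp [List.findSome?, h]
    simp only [List.foldl_cons, List.reverse_cons, List.findSome?_append, ih, hsing,
      step_get? (φ j) g0 x (hnd j), Option.or_assoc]

theorem pv_findSome_singleton {α β : Type} (f : α → Option β) (a : α) :
    List.findSome? f [a] = f a := by
  cases h : f a <;> simp [List.findSome?, h]

theorem ports_eq (iterations : List (List (String × List (Int × Int)))) (ind : Int) :
    sample_at iterations ind = sample_at_alt iterations ind := by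
  unfold sample_at sample_at_alt
  by_cases hle : ind > (iterations.length : Int)
  · simp [hle]
  · simp only [if_neg hle]
    apply List.map_congr_left
    intro k _
    rw [PySem.Dict.getD_eq_get?_getD]
    congr 1
    rw [foldl_steps_get? _ (fun step : Int => pvStatus iterations step.toNat) _ _ (by
      intro j
      unfold pvStatus
      exact PySem.Dict.nodup_keys_ofList _)]
    -- the countdown range of B is the reverse of range(0, max(m,1))
    rw [PySem.List.pyRange_neg_one_eq_reverse]
    rw [show (-1 : Int) + 1 = 0 from rfl]
    rw [show max (min (ind + 1) (iterations.length : Int)) 1 - 1 + 1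
          = max (min (ind + 1) (iterations.length : Int)) 1 from by omega]
    set m := min (ind + 1) (iterations.length : Int) with hm
    by_cases hpos : 0 < m
    · have hsplit : PySem.List.pyRange 0 (max m 1) 1 = 0 :: PySem.List.pyRange 1 m 1 := by
        rw [show max m 1 = m from by omega, PySem.List.pyRange_one_cons hpos]
        norm_num
      rw [hsplit, List.reverse_cons, List.findSome?_append, pv_findSome_singleton]
      rfl
    · have hone : PySem.List.pyRange 0 (max m 1) 1 = [0] := by
        rw [show max m 1 = 1 from by omega]
        rfl
      have hnil : PySem.List.pyRange 1 m 1 = [] := PySem.List.pyRange_one_eq_nil (by omega)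
      rw [hone, hnil, List.reverse_singleton, pv_findSome_singleton]
      simp only [List.reverse_nil, List.findSome?_nil]
      rfl

-- ===== VERDICT (by name: the statement is the Claim_ definition above) =====
theorem sample_at_spec : Claim_equal_sample_at := by
  intro iterations ind _ _
  unfold Spec_sample_at
  exact ports_eq iterations ind
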